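-- pv_equiv track=rewrite | github.com/riders994/WojBot | tools/commonfuncs.py | create_flag_dict
-- ===== SOURCE A (Python) =====
-- from collections import defaultdict
--
-- def create_flag_dict(messages):
--     res = defaultdict(list)
--     flagged = 0
--     key = None
--     for msg in messages:
--         if msg[0] == '-':
--             key = msg.replace('-', '')
--             flagged = 1
--         elif flagged:
--             res[key].append(msg)
--     return res
-- ===== SOURCE B (Python) =====
-- from collections import defaultdict
--
-- def create_flag_dict(messages):
--     # pass 1: cut the stream into (key, msgs) segments, one per flag message
--     segments = []
--     for msg in messages:
--         if msg[0] == '-':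
--             segments.append((msg.replace('-', ''), []))
--         elif segments:
--             segments[-1][1].append(msg)
--     # pass 2: merge segments into buckets; empty segments create no entry
--     res = defaultdict(list)
--     for key, msgs in segments:
--         if msgs:
--             res[key].extend(msgs)
--     return res
-- ===== Notes on version B (the rewrite author's own statement) =====
-- stated objective: alternative
-- what changed: B replaces A's single stateful loop (flagged/key registers mutating a dict) by a two-pass decomposition: first segment the stream into (key, messages) blocks, then fold the non-empty segments into the result dict.
import Mathlib
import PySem

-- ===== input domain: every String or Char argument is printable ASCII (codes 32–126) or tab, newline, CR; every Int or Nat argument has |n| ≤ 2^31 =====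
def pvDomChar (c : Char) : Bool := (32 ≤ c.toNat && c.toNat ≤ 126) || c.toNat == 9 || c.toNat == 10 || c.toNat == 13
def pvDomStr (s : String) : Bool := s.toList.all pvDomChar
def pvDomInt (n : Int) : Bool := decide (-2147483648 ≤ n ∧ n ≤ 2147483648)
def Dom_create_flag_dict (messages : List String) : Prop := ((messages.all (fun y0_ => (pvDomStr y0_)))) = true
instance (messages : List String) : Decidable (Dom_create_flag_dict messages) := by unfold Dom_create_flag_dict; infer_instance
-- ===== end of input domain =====

-- B re-decomposes A's single stateful loop into two passes (segment, then merge); same cost, alternative structure.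

-- ===== PORT A =====
-- one loop iteration of A: state = (res, flagged, key)
def cfdStepA (st : PySem.Dict String (List String) × Bool × String) (msg : String) :
    PySem.Dict String (List String) × Bool × String :=
  if PySem.Str.pyGet? msg 0 = some '-' then
    (st.1, true, PySem.Str.replace msg "-" "")
  else if st.2.1 then
    (st.1.insert st.2.2 (st.1.getD st.2.2 [] ++ [msg]), st.2.1, st.2.2)
  else st

def create_flag_dict (messages : List String) : List (String × List String) :=
  (messages.foldl cfdStepA (PySem.Dict.empty, false, "")).1.items

-- ===== PORT B =====
-- pass 1 iteration: open a new segment on a flag, else append to the last segment (if any)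
def cfdSeg (segs : List (String × List String)) (msg : String) : List (String × List String) :=
  if PySem.Str.pyGet? msg 0 = some '-' then
    segs ++ [(PySem.Str.replace msg "-" "", [])]
  else
    match segs.getLast? with
    | none => segs
    | some p => segs.dropLast ++ [(p.1, p.2 ++ [msg])]

-- pass 2 iteration: merge one segment into the dict, skipping empty segments
def cfdMerge (res : PySem.Dict String (List String)) (kv : String × List String) :
    PySem.Dict String (List String) :=
  if kv.2 = [] then res else res.insert kv.1 (res.getD kv.1 [] ++ kv.2)

def create_flag_dict_alt (messages : List String) : List (String × List String) :=
  ((messages.foldl cfdSeg []).foldl cfdMerge PySem.Dict.empty).items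

-- ===== PRECONDITION & SPEC =====
-- Pre_ excludes lists containing the empty string, on which A raises IndexError (msg[0]).
def Pre_create_flag_dict (messages : List String) : Prop := ∀ m ∈ messages, m ≠ ""
instance (messages : List String) : Decidable (Pre_create_flag_dict messages) := by
  unfold Pre_create_flag_dict; infer_instance
def pvWitness_create_flag_dict : List String := ["-a", "hello", "x y", "--b", "7"]

def Spec_create_flag_dict (messages : List String) (out : List (String × List String)) : Prop :=
  out = create_flag_dict_alt messages
instance (messages : List String) (out : List (String × List String)) :
    Decidable (Spec_create_flag_dict messages out) := by unfold Spec_create_flag_dict; infer_instance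

-- ===== CLAIM (what is proved, stated in full; the proofs are below) =====
def Claim_equal_create_flag_dict : Prop := ∀ (messages : List String),
  Dom_create_flag_dict messages → Pre_create_flag_dict messages →
  Spec_create_flag_dict messages (create_flag_dict messages)

-- ===== LEMMAS AND PROOFS =====

-- merging an empty segment does nothing
theorem cfdMerge_nil (r : PySem.Dict String (List String)) (k : String) :
    cfdMerge r (k, []) = r := by simp [cfdMerge]

-- appending one message to a segment commutes with merging it, via A's insert step
theorem cfdMerge_snoc (r : PySem.Dict String (List String)) (k : String) (ms : List String)
    (msg : String) :
    cfdMerge r (k, ms ++ [msg]) =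
      (cfdMerge r (k, ms)).insert k ((cfdMerge r (k, ms)).getD k [] ++ [msg]) := by
  rcases ms with _ | ⟨m, ms⟩
  · simp [cfdMerge]
  · simp [cfdMerge, PySem.Dict.getD_insert_self, PySem.Dict.insert_insert_self,
      List.append_assoc]

-- the invariant: A's fold from a state matching the segments equals B's two passes
theorem cfd_inv (msgs : List String) :
    ∀ (segs : List (String × List String)) (key : String),
    (∀ p, segs.getLast? = some p → p.1 = key) →
    (msgs.foldl cfdStepA (segs.foldl cfdMerge PySem.Dict.empty, !segs.isEmpty, key)).1
      = (msgs.foldl cfdSeg segs).foldl cfdMerge PySem.Dict.empty := by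
  induction msgs with
  | nil => intro segs key _; rfl
  | cons msg rest ih =>
    intro segs key hkey
    simp only [List.foldl_cons]
    by_cases hflag : PySem.Str.pyGet? msg 0 = some '-'
    · -- a flag message: open a fresh (empty) segment; the merged dict is unchanged
      have hstep : cfdStepA (segs.foldl cfdMerge PySem.Dict.empty, !segs.isEmpty, key) msg
          = ((segs ++ [(PySem.Str.replace msg "-" "", [])]).foldl cfdMerge PySem.Dict.empty,
             !(segs ++ [(PySem.Str.replace msg "-" "", [])]).isEmpty,
             PySem.Str.replace msg "-" "") := by
        unfold cfdStepA
        rw [if_pos hflag]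
        simp [List.foldl_append, cfdMerge_nil]
      have hseg : cfdSeg segs msg = segs ++ [(PySem.Str.replace msg "-" "", [])] := by
        unfold cfdSeg; rw [if_pos hflag]
      rw [hstep, hseg]
      refine ih _ (PySem.Str.replace msg "-" "") ?_
      intro p hp
      rw [List.getLast?_concat] at hp
      cases hp; rfl
    · rcases List.eq_nil_or_concat segs with hnil | ⟨pre, last, hconcat⟩
      · -- no segment open yet: both sides drop the message
        subst hnil
        have hstep : cfdStepA (List.foldl cfdMerge PySem.Dict.empty ([] : List (String × List String)),
              !List.isEmpty ([] : List (String × List String)), key) msg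
            = (List.foldl cfdMerge PySem.Dict.empty ([] : List (String × List String)),
               !List.isEmpty ([] : List (String × List String)), key) := by
          unfold cfdStepA
          rw [if_neg hflag]
          rfl
        have hseg : cfdSeg [] msg = [] := by
          unfold cfdSeg; rw [if_neg hflag]; rfl
        rw [hstep, hseg]
        exact ih [] key hkey
      · -- a segment is open: A appends to the bucket of `key`, B extends the last segment
        subst hconcat
        obtain ⟨lk, lms⟩ := last
        have hk : lk = key := hkey (lk, lms) (by simp)
        subst hk
        have hb : (pre ++ [(lk, lms)]).isEmpty = false := by simp
        have hstep : cfdStepA ((pre ++ [(lk, lms)]).foldl cfdMerge PySem.Dict.empty,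
              !(pre ++ [(lk, lms)]).isEmpty, lk) msg
            = ((pre ++ [(lk, lms ++ [msg])]).foldl cfdMerge PySem.Dict.empty,
               !(pre ++ [(lk, lms ++ [msg])]).isEmpty, lk) := by
          unfold cfdStepA
          rw [if_neg hflag]
          simp only [hb, Bool.not_false, if_true, List.foldl_append, List.foldl_cons,
            List.foldl_nil]
          rw [← cfdMerge_snoc]
          simp
        have hseg : cfdSeg (pre ++ [(lk, lms)]) msg = pre ++ [(lk, lms ++ [msg])] := by
          unfold cfdSeg
          rw [if_neg hflag]
          simp
        simp only [List.concat_eq_append] at *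
        rw [hstep, hseg]
        refine ih _ lk ?_
        intro p hp
        rw [List.getLast?_concat] at hp
        cases hp; rfl

-- ===== VERDICT (by name: the statement is the Claim_ definition above) =====
theorem create_flag_dict_spec : Claim_equal_create_flag_dict := by
  intro messages _ _
  unfold Spec_create_flag_dict create_flag_dict create_flag_dict_alt
  have := cfd_inv messages [] "" (by intro p hp; simp at hp)
  simpa using congrArg PySem.Dict.items this
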